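-- pv_equiv track=rewrite | github.com/alexander-nemirovskiy/s2r_mapping_ui | backend/app/core/annotation_pipeline/functions.py | unwanted_elements_remover
-- ===== SOURCE A (Python) =====
-- def unwanted_elements_remover(input_list):
--     """Function to loop to traverse each element in list and, remove elements which are equals to the del items"""
--     item_list = input_list
--     # elements to be removed to be removed
--     del_item1 = 'a'
--     del_item2 = ';'
--     del_item3 = ','
--
--     i=0 #loop counter
--     length = len(item_list)  #list length
--     while(i<length):
--         if(item_list[i]==del_item1 or item_list[i]==del_item2 or item_list[i]==del_item3):
--             item_list.remove(item_list[i])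
--             # as an element is removed
--             # so decrease the length by 1
--             length = length - 1
--             # run loop again to check element
--             # at same index, when item removed
--             # next item will shift to the left
--             continue
--         i = i+1
--     # removing the attache ; and , to the end of each element
--     for ii in range(len(item_list)):
--         item = item_list[ii]
--         if item[-1] == ',' or item[-1] == ';':  # checking the last char to find unwanted ',' and ';'
--             cleaned_item = item[0:-1]  # dropping the last char
--             item_list[ii] = cleaned_item  # replacing the item with the cleaned one in the list
--     return item_list
-- ===== SOURCE B (Python) =====
-- def unwanted_elements_remover(input_list):
--     """One pass: drop the unwanted elements and strip a trailing ',' or ';' at once."""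
--     cleaned = [x[:-1] if x[-1] in (',', ';') else x
--                for x in input_list
--                if x not in ('a', ';', ',')]
--     input_list[:] = cleaned
--     return input_list
-- ===== Notes on version B (the rewrite author's own statement) =====
-- stated objective: simpler
-- what changed: Replaces A's in-place remove-while-scanning loop plus a second index-assignment strip pass with a single filtering comprehension that strips in the same pass and is written back via input_list[:].
import Mathlib
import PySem

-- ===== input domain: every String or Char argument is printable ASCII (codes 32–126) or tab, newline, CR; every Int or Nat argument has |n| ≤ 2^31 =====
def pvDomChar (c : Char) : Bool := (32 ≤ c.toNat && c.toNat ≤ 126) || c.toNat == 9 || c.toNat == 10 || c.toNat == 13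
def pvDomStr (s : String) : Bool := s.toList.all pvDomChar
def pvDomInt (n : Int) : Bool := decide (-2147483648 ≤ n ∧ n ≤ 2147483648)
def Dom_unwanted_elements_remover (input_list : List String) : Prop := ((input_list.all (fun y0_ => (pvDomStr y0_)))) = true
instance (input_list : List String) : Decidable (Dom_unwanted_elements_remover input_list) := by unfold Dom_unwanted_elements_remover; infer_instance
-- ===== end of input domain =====

-- B collapses A's in-place remove loop + second strip pass into one filtering pass (objective: simpler).
-- A mutates input_list in place; B mutates it via input_list[:] = …; the theorems are about the return value.

-- ===== PORT A =====
-- list.remove(x): drop the first occurrence (hand port, exact: x is known present at call sites)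
def pvRemoveFirst : List String → String → List String
  | [], _ => []
  | y :: ys, x => if y = x then ys else y :: pvRemoveFirst ys x

theorem pvRemoveFirst_length_lt (l : List String) (x : String) (hx : x ∈ l) :
    (pvRemoveFirst l x).length < l.length := by
  induction l with
  | nil => cases hx
  | cons y ys ih =>
    by_cases h : y = x
    · simp [pvRemoveFirst, h]
    · have hx' : x ∈ ys := by cases hx with
        | head => exact absurd rfl h
        | tail _ h' => exact h'
      simpa [pvRemoveFirst, h] using ih hx'

-- the while loop of A: scan with index i, removing matches in place
def pvWhileA (item_list : List String) (i : Nat) : List String :=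
  if h : i < item_list.length then
    let x := item_list[i]
    if x = "a" ∨ x = ";" ∨ x = "," then
      pvWhileA (pvRemoveFirst item_list x) i
    else
      pvWhileA item_list (i + 1)
  else item_list
termination_by item_list.length - i
decreasing_by
  · have := pvRemoveFirst_length_lt item_list item_list[i] (List.getElem_mem h)
    omega
  · omega

-- the second for loop: item_list[ii] = cleaned item (index assignment over range(len) = map)
def pvStripA (item : String) : String :=
  if PySem.Str.pyGet? item (-1) = some ',' ∨ PySem.Str.pyGet? item (-1) = some ';' then
    let cleaned_item := PySem.Str.slice item (some 0) (some (-1))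
    cleaned_item
  else item

def unwanted_elements_remover (input_list : List String) : List String :=
  (pvWhileA input_list 0).map pvStripA

-- ===== PORT B =====
def unwanted_elements_remover_alt (input_list : List String) : List String :=
  input_list.filterMap (fun x =>
    if x = "a" ∨ x = ";" ∨ x = "," then none
    else some (if PySem.Str.pyGet? x (-1) = some ',' ∨ PySem.Str.pyGet? x (-1) = some ';'
               then PySem.Str.slice x none (some (-1))
               else x))

-- ===== PRECONDITION & SPEC =====
-- Pre_ excludes lists containing the empty string: there Python A (and B) raises IndexError on item[-1].
def Pre_unwanted_elements_remover (input_list : List String) : Prop := "" ∉ input_list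
instance (input_list : List String) : Decidable (Pre_unwanted_elements_remover input_list) := by
  unfold Pre_unwanted_elements_remover; infer_instance
def pvWitness_unwanted_elements_remover : List String := ["ab,", "a", ";", ",", "x;y", "zz;"]

def Spec_unwanted_elements_remover (input_list : List String) (out : List String) : Prop := out = unwanted_elements_remover_alt input_list
instance (input_list : List String) (out : List String) : Decidable (Spec_unwanted_elements_remover input_list out) := by unfold Spec_unwanted_elements_remover; infer_instance

-- ===== CLAIM (what is proved, stated in full; the proofs are below) =====
def Claim_equal_unwanted_elements_remover : Prop := ∀ (input_list : List String), Dom_unwanted_elements_remover input_list → Pre_unwanted_elements_remover input_list → Spec_unwanted_elements_remover input_list (unwanted_elements_remover input_list)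

-- ===== LEMMAS AND PROOFS =====

def pvKeep (x : String) : Bool := !(x = "a" ∨ x = ";" ∨ x = ",")

theorem pvRemoveFirst_at (x : String) :
    ∀ (l : List String) (i : Nat), (h : i < l.length) → l[i] = x →
    (∀ y ∈ l.take i, pvKeep y = true) → pvKeep x = false →
    pvRemoveFirst l x = l.take i ++ l.drop (i + 1) := by
  intro l
  induction l with
  | nil => intro i h; simp at h
  | cons z zs ih =>
    intro i h hget hpre hx
    cases i with
    | zero =>
      simp at hget
      simp [pvRemoveFirst, hget]
    | succ j =>
      have hz : pvKeep z = true := hpre z (by simp)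
      have hzx : ¬ z = x := by
        intro e; rw [e] at hz; rw [hx] at hz; exact Bool.false_ne_true hz
      have hj : j < zs.length := by simpa using h
      have hget' : zs[j] = x := by simpa using hget
      have hpre' : ∀ y ∈ zs.take j, pvKeep y = true := by
        intro y hy; exact hpre y (by simp [List.take_succ_cons]; right; exact hy)
      simp [pvRemoveFirst, hzx, List.take_succ_cons, List.drop_succ_cons,
        ih j hj hget' hpre' hx]

theorem pvWhileA_spec :
    ∀ (n : Nat) (l : List String) (i : Nat), l.length - i ≤ n →
    (∀ y ∈ l.take i, pvKeep y = true) →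
    pvWhileA l i = l.take i ++ (l.drop i).filter pvKeep := by
  intro n
  induction n with
  | zero =>
    intro l i hn hpre
    have hge : l.length ≤ i := by omega
    rw [pvWhileA]
    simp [Nat.not_lt.mpr hge, List.take_of_length_le hge, List.drop_of_length_le hge]
  | succ m ih =>
    intro l i hn hpre
    rw [pvWhileA]
    by_cases h : i < l.length
    · simp only [h, dif_pos]
      set x := l[i] with hx
      have hdrop : l.drop i = x :: l.drop (i + 1) := List.drop_eq_getElem_cons h
      by_cases hd : x = "a" ∨ x = ";" ∨ x = ","
      · simp only [hd, if_pos]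
        have hxk : pvKeep x = false := by simp [pvKeep, hd]
        have hrem : pvRemoveFirst l x = l.take i ++ l.drop (i + 1) :=
          pvRemoveFirst_at x l i h rfl hpre hxk
        have hlen : (pvRemoveFirst l x).length - i ≤ m := by
          have := pvRemoveFirst_length_lt l x (hx ▸ List.getElem_mem h)
          omega
        have htk : (pvRemoveFirst l x).take i = l.take i := by
          rw [hrem, List.take_append_of_le_length (by simp [List.length_take]; omega)]
          simp [List.take_take]
        have hdr : (pvRemoveFirst l x).drop i = l.drop (i + 1) := by
          rw [hrem, List.drop_append_of_le_length (by simp [List.length_take]; omega)]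
          simp [List.length_take, Nat.min_eq_left (Nat.le_of_lt h)]
        rw [ih (pvRemoveFirst l x) i hlen (by rw [htk]; exact hpre), htk, hdr,
          hdrop, List.filter_cons_of_neg (by simp [hxk])]
      · simp only [hd, if_neg, not_false_iff]
        have hxk : pvKeep x = true := by simp [pvKeep]; tauto
        have hpre' : ∀ y ∈ l.take (i + 1), pvKeep y = true := by
          intro y hy
          rw [List.take_add_one] at hy
          rcases List.mem_append.mp hy with h1 | h2
          · exact hpre y h1
          · have : y = x := by
              simp [List.getElem?_eq_getElem h] at h2; simpa [hx] using h2
            rw [this]; exact hxk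
        rw [ih l (i + 1) (by omega) hpre', hdrop, List.filter_cons_of_pos hxk,
          show l.take (i + 1) = l.take i ++ [x] from by
            rw [List.take_add_one, List.getElem?_eq_getElem h]; simp [hx]]
        simp
    · simp only [h, dif_neg, not_false_iff]
      have hge : l.length ≤ i := Nat.le_of_not_lt h
      simp [List.take_of_length_le hge, List.drop_of_length_le hge]

theorem pvStripA_eq (x : String) :
    pvStripA x = (if PySem.Str.pyGet? x (-1) = some ',' ∨ PySem.Str.pyGet? x (-1) = some ';'
      then PySem.Str.slice x none (some (-1)) else x) := by
  unfold pvStripA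
  split_ifs with h
  · simp [PySem.Str.slice]
  · rfl

theorem map_filter_eq_filterMap (l : List String) :
    (l.filter pvKeep).map pvStripA = unwanted_elements_remover_alt l := by
  unfold unwanted_elements_remover_alt
  induction l with
  | nil => rfl
  | cons x xs ih =>
    by_cases h : x = "a" ∨ x = ";" ∨ x = ","
    · have : pvKeep x = false := by simp [pvKeep, h]
      simp [List.filter_cons, this, List.filterMap_cons, h, ih]
    · have : pvKeep x = true := by simp [pvKeep]; tauto
      simp [List.filter_cons, this, List.filterMap_cons, h, ih, pvStripA_eq]

-- ===== VERDICT (by name: the statement is the Claim_ definition above) =====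
theorem unwanted_elements_remover_spec : Claim_equal_unwanted_elements_remover := by
  intro input_list _ _
  unfold Spec_unwanted_elements_remover unwanted_elements_remover
  rw [pvWhileA_spec input_list.length input_list 0 (by omega) (by simp)]
  simpa using map_filter_eq_filterMap input_list
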